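-- pv_equiv track=rewrite | github.com/wb-platform-engineering-lab/python-lab | phase-1-core-python/src/02_loops_solution.py | poll_shipment
-- ===== SOURCE A (Python) =====
-- def poll_shipment(max_checks, success_on_check):
--     arrived = False
--     checks  = 0
--     while not arrived and checks < max_checks:
--         checks += 1
--         if checks == success_on_check:
--             arrived = True
--             break
--     return arrived, checks
-- ===== SOURCE B (Python) =====
-- def poll_shipment(max_checks, success_on_check):
--     if 1 <= success_on_check <= max_checks:
--         return True, success_on_check
--     return False, max(max_checks, 0)
-- ===== Notes on version B (the rewrite author's own statement) =====
-- stated objective: faster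
-- what changed: Replaces the counting while-loop with an O(1) closed form: (True, success_on_check) when 1 <= success_on_check <= max_checks, else (False, max(max_checks, 0)).
import Mathlib
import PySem

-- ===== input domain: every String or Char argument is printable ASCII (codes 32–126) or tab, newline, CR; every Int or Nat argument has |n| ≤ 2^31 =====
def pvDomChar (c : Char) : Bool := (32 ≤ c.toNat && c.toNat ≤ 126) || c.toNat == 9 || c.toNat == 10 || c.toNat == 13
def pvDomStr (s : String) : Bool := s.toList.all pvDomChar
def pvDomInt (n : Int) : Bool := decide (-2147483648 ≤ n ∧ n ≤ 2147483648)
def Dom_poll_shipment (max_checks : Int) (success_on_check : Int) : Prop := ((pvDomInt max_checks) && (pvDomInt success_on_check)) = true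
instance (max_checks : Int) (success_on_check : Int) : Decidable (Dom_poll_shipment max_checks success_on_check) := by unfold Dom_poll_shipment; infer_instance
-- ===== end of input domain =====

-- B replaces A's counting while-loop by an O(1) closed-form conditional (objective: faster).

-- ===== PORT A =====
-- the while-loop of A, carrying the same state (arrived, checks)
def pollLoop (max_checks success_on_check : Int) (arrived : Bool) (checks : Int) : Bool × Int :=
  if h : ¬arrived ∧ checks < max_checks then
    let checks' := checks + 1
    if checks' = success_on_check then (true, checks')
    else pollLoop max_checks success_on_check arrived checks'
  else (arrived, checks)
termination_by (max_checks - checks).toNat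
decreasing_by omega

def poll_shipment (max_checks : Int) (success_on_check : Int) : Bool × Int :=
  pollLoop max_checks success_on_check false 0

-- ===== PORT B =====
def poll_shipment_alt (max_checks : Int) (success_on_check : Int) : Bool × Int :=
  if 1 ≤ success_on_check ∧ success_on_check ≤ max_checks then (true, success_on_check)
  else (false, max max_checks 0)

-- ===== PRECONDITION & SPEC =====
def Spec_poll_shipment (max_checks : Int) (success_on_check : Int) (out : Bool × Int) : Prop := out = poll_shipment_alt max_checks success_on_check
instance (max_checks : Int) (success_on_check : Int) (out : Bool × Int) : Decidable (Spec_poll_shipment max_checks success_on_check out) := by unfold Spec_poll_shipment; infer_instance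

-- ===== CLAIM (what is proved, stated in full; the proofs are below) =====
def Claim_equal_poll_shipment : Prop := ∀ (max_checks : Int) (success_on_check : Int), Dom_poll_shipment max_checks success_on_check → Spec_poll_shipment max_checks success_on_check (poll_shipment max_checks success_on_check)

-- ===== LEMMAS AND PROOFS =====
theorem pollLoop_closed (m s checks : Int) :
    pollLoop m s false checks =
      if checks < s ∧ s ≤ m then (true, s) else (false, max m checks) := by
  fun_induction pollLoop m s false checks with
  | case1 checks h hs =>
      obtain ⟨-, hlt⟩ := h
      split
      · next h2 => exact Prod.ext rfl (by omega)
      · next h2 => exact absurd ⟨by omega, by omega⟩ h2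
  | case2 checks h c' hne ih =>
      obtain ⟨-, hlt⟩ := h
      rw [ih]
      split <;> split <;> first
        | rfl
        | (exfalso; omega)
        | exact Prod.ext rfl (by omega)
  | case3 checks h =>
      have hge : m ≤ checks := by
        by_contra hc; exact h ⟨by simp, by omega⟩
      split
      · next h2 => exact absurd h2 (by omega)
      · next h2 => exact Prod.ext rfl (by omega)

-- ===== VERDICT (by name: the statement is the Claim_ definition above) =====
theorem poll_shipment_spec : Claim_equal_poll_shipment := by
  intro m s _
  unfold Spec_poll_shipment poll_shipment poll_shipment_alt
  rw [pollLoop_closed]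
  split <;> split <;> first
    | rfl
    | (exfalso; omega)
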